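-- pv_equiv track=rewrite | github.com/davideiaco/api-scuole-libri | main.py | parse_libri
-- ===== SOURCE A (Python) =====
-- from typing import Any, Dict, List, Optional, Tuple
--
-- def binding_value(item: Dict[str, Any], key: str) -> Optional[str]:
--     return item.get(key, {}).get("value")
--
-- def parse_libri(bindings: List[Dict[str, Any]]) -> List[Dict[str, Any]]:
--     return [
--         {
--             "CodiceScuola": binding_value(item, "CodiceScuola"),
--             "AnnoCorso": binding_value(item, "AnnoCorso"),
--             "SezioneAnno": binding_value(item, "SezioneAnno"),
--             "TipoGradoScuola": binding_value(item, "TipoGradoScuola"),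
--             "Combinazione": binding_value(item, "Combinazione"),
--             "Disciplina": binding_value(item, "Disciplina"),
--             "CodiceISBN": binding_value(item, "CodiceISBN"),
--             "Autori": binding_value(item, "Autori"),
--             "Titolo": binding_value(item, "Titolo"),
--             "Sottotitolo": binding_value(item, "Sottotitolo"),
--             "Volume": binding_value(item, "Volume"),
--             "Editore": binding_value(item, "Editore"),
--             "Prezzo": binding_value(item, "Prezzo"),
--             "NuovaAdoz": binding_value(item, "NuovaAdoz"),
--             "DaAcquist": binding_value(item, "DaAcquist"),
--             "Consigliato": binding_value(item, "Consigliato"),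
--         }
--         for item in bindings
--     ]
-- ===== SOURCE B (Python) =====
-- KEYS = (
--     "CodiceScuola", "AnnoCorso", "SezioneAnno", "TipoGradoScuola",
--     "Combinazione", "Disciplina", "CodiceISBN", "Autori",
--     "Titolo", "Sottotitolo", "Volume", "Editore",
--     "Prezzo", "NuovaAdoz", "DaAcquist", "Consigliato",
-- )
--
-- def parse_libri(bindings):
--     result = []
--     for item in bindings:
--         row = dict.fromkeys(KEYS)  # all fields preset to None, in output order
--         for key, binding in item.items():
--             if key in row:
--                 row[key] = binding.get("value")
--         result.append(row)
--     return result
-- ===== Notes on version B (the rewrite author's own statement) =====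
-- stated objective: alternative
-- what changed: B inverts the traversal: instead of one lookup into the item per field, it pre-blanks a row keyed by the ordered KEYS table and fills it in a single pass over the item's entries; Pre_ excludes association-list encodings with duplicate top-level keys in an item (unrepresentable as a Python dict), where first-match vs last-write is unspecified.
import Mathlib
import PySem

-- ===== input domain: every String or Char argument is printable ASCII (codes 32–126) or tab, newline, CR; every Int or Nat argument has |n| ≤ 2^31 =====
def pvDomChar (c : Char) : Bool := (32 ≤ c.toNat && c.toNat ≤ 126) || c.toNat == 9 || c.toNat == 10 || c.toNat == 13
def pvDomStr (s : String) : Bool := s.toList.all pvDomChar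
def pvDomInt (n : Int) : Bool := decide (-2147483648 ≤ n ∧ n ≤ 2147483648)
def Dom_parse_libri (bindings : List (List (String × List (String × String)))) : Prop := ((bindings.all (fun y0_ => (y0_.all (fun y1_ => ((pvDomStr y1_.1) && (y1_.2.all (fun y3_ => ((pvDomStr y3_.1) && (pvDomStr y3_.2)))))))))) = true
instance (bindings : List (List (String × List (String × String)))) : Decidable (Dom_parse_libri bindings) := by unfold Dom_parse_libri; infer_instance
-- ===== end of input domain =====

-- B inverts the traversal: instead of one lookup into the item per field, it pre-blanks a row over
-- the ordered KEYS table and fills it in a single pass over the item's entries (objective: alternative).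


-- ===== PORT A =====
-- item.get(key, {}).get("value") on association lists: first match, None if absent
def binding_value (item : List (String × List (String × String))) (key : String) : Option String :=
  match item.find? (fun p => p.1 == key) with
  | some p => (p.2.find? (fun q => q.1 == "value")).map (·.2)
  | none => none

def parse_libri (bindings : List (List (String × List (String × String)))) : List (List (String × Option String)) :=
  bindings.map (fun item =>
    [ ("CodiceScuola", binding_value item "CodiceScuola"),
      ("AnnoCorso", binding_value item "AnnoCorso"),
      ("SezioneAnno", binding_value item "SezioneAnno"),
      ("TipoGradoScuola", binding_value item "TipoGradoScuola"),
      ("Combinazione", binding_value item "Combinazione"),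
      ("Disciplina", binding_value item "Disciplina"),
      ("CodiceISBN", binding_value item "CodiceISBN"),
      ("Autori", binding_value item "Autori"),
      ("Titolo", binding_value item "Titolo"),
      ("Sottotitolo", binding_value item "Sottotitolo"),
      ("Volume", binding_value item "Volume"),
      ("Editore", binding_value item "Editore"),
      ("Prezzo", binding_value item "Prezzo"),
      ("NuovaAdoz", binding_value item "NuovaAdoz"),
      ("DaAcquist", binding_value item "DaAcquist"),
      ("Consigliato", binding_value item "Consigliato") ])

-- ===== PORT B =====
def pvKEYS : List String :=
  [ "CodiceScuola", "AnnoCorso", "SezioneAnno", "TipoGradoScuola",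
    "Combinazione", "Disciplina", "CodiceISBN", "Autori",
    "Titolo", "Sottotitolo", "Volume", "Editore",
    "Prezzo", "NuovaAdoz", "DaAcquist", "Consigliato" ]

-- binding.get("value"): first match in the inner association list
def pvGetValue (b : List (String × String)) : Option String :=
  (b.find? (fun q => q.1 == "value")).map (·.2)

-- row = dict.fromkeys(KEYS); then one pass over the item's entries filling matching fields
def parse_libri_alt (bindings : List (List (String × List (String × String)))) : List (List (String × Option String)) :=
  bindings.foldl (fun result item =>
    let row0 : PySem.Dict String (Option String) :=
      PySem.Dict.ofList (pvKEYS.map (fun k => (k, (none : Option String))))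
    let row := item.foldl (fun row p =>
      if row.contains p.1 then row.insert p.1 (pvGetValue p.2) else row) row0
    result ++ [row.items]) []

-- ===== PRECONDITION & SPEC =====
-- Pre_ excludes inputs whose association-list items carry duplicate top-level keys: there first-match
-- (A's per-field lookup) vs last-write (B's single pass) is an unspecified corner of the dict
-- encoding — a Python dict cannot even represent such an item, and on the collapsed dict both
-- Pythons return the same value.
def Pre_parse_libri (bindings : List (List (String × List (String × String)))) : Prop :=
  ∀ item ∈ bindings, (item.map Prod.fst).Nodup
instance (bindings : List (List (String × List (String × String)))) : Decidable (Pre_parse_libri bindings) := by unfold Pre_parse_libri; infer_instance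

def pvWitness_parse_libri : (List (List (String × List (String × String)))) :=
  [[("Titolo", [("value", "x")]), ("Junk", [("v", "y")])], []]

def Spec_parse_libri (bindings : List (List (String × List (String × String)))) (out : List (List (String × Option String))) : Prop := out = parse_libri_alt bindings
instance (bindings : List (List (String × List (String × String)))) (out : List (List (String × Option String))) : Decidable (Spec_parse_libri bindings out) := by unfold Spec_parse_libri; infer_instance

-- ===== CLAIM (what is proved, stated in full; the proofs are below) =====
def Claim_equal_parse_libri : Prop := ∀ (bindings : List (List (String × List (String × String)))), Dom_parse_libri bindings → Pre_parse_libri bindings → Spec_parse_libri bindings (parse_libri bindings)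

-- ===== LEMMAS AND PROOFS =====

-- Invariant of B's inner pass: if the row's items are pvKEYS tagged by g, after folding an item with
-- distinct keys they are pvKEYS tagged by "first match in item, else g".
theorem pv_fold_items (item : List (String × List (String × String)))
    (g : String → Option String) (d : PySem.Dict String (Option String))
    (hd : d.items = pvKEYS.map (fun k => (k, g k)))
    (hnd : (item.map Prod.fst).Nodup) :
    (item.foldl (fun row p =>
      if row.contains p.1 then row.insert p.1 (pvGetValue p.2) else row) d).items
    = pvKEYS.map (fun k => (k,
        match item.find? (fun p => p.1 == k) with
        | some p => pvGetValue p.2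
        | none => g k)) := by
  induction item generalizing g d with
  | nil => simpa using hd
  | cons hd0 rest ih =>
    obtain ⟨k0, b0⟩ := hd0
    have hkeys : d.keys = pvKEYS := by
      simp [PySem.Dict.keys, hd, Function.comp_def]
    simp only [List.map_cons, List.nodup_cons, List.mem_map] at hnd
    by_cases hmem : k0 ∈ pvKEYS
    · have hc : d.contains k0 = true := by
        rw [PySem.Dict.contains_eq_decide_mem_keys, hkeys]; simpa using hmem
      have hins : (d.insert k0 (pvGetValue b0)).items
          = pvKEYS.map (fun k => (k, if k = k0 then pvGetValue b0 else g k)) := by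
        rw [PySem.Dict.items_insert_of_contains _ _ hc, hd, List.map_map]
        refine List.map_congr_left (fun k _ => ?_)
        by_cases hk : k = k0 <;> simp [Function.comp, hk]
      rw [List.foldl_cons]
      simp only [hc, if_true]
      rw [ih _ _ hins hnd.2]
      refine List.map_congr_left (fun k _ => ?_)
      by_cases hk : k = k0
      · subst hk
        have hnone : rest.find? (fun p => p.1 == k) = none := by
          rw [List.find?_eq_none]
          intro p hp
          simp only [beq_iff_eq]
          exact fun h => hnd.1 ⟨p, hp, h⟩
        simp [hnone]
      · have hne : ¬ ((fun p : String × List (String × String) => p.1 == k) (k0, b0) = true) := by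
          simpa using fun h : k0 = k => hk h.symm
        rw [List.find?_cons_of_neg (p := fun p => p.1 == k) (a := (k0, b0)) (l := rest) hne]
        cases hfind : rest.find? (fun p => p.1 == k) <;> simp [hk]
    · have hc : d.contains k0 = false := by
        rw [PySem.Dict.contains_eq_decide_mem_keys, hkeys]; simpa using hmem
      rw [List.foldl_cons]
      simp only [hc, Bool.false_eq_true, if_false]
      rw [ih _ _ hd hnd.2]
      refine List.map_congr_left (fun k hk => ?_)
      have hne : ¬ ((fun p : String × List (String × String) => p.1 == k) (k0, b0) = true) := by
        simpa using fun h : k0 = k => hmem (h ▸ hk)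
      rw [List.find?_cons_of_neg (p := fun p => p.1 == k) (a := (k0, b0)) (l := rest) hne]

-- fold characterization specialized at g = const none gives exactly A's per-field lookups
theorem pv_row_eq (item : List (String × List (String × String)))
    (hnd : (item.map Prod.fst).Nodup) :
    (item.foldl (fun row p =>
      if row.contains p.1 then row.insert p.1 (pvGetValue p.2) else row)
      (PySem.Dict.ofList (pvKEYS.map (fun k => (k, (none : Option String)))))).items
    = pvKEYS.map (fun k => (k, binding_value item k)) := by
  have hbase : (PySem.Dict.ofList (pvKEYS.map (fun k => (k, (none : Option String))))).items
      = pvKEYS.map (fun k => (k, (fun _ : String => (none : Option String)) k)) := by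
    decide
  rw [pv_fold_items item (fun _ => none) _ hbase hnd]
  refine List.map_congr_left (fun k _ => ?_)
  unfold binding_value pvGetValue
  cases hfind : item.find? (fun p => p.1 == k) <;> simp

-- ===== VERDICT (by name: the statement is the Claim_ definition above) =====
theorem parse_libri_spec : Claim_equal_parse_libri := by
  intro bindings _ hpre
  unfold Spec_parse_libri parse_libri parse_libri_alt
  rw [PySem.List.foldl_append_singleton_eq_map]
  refine List.map_congr_left (fun item hitem => ?_)
  dsimp only
  rw [pv_row_eq item (hpre item hitem)]
  simp [pvKEYS]
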